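-- pv_equiv track=rewrite | github.com/suyeon0109/programmers | 예상_대진표.py | solution
-- ===== SOURCE A (Python) =====
-- def solution(n,a,b):
--
--     cnt = 0
--
--     while a != b :
--         a += 1
--         b += 1
--         a //= 2
--         b //= 2
--         cnt += 1
--
--     return cnt
-- ===== SOURCE B (Python) =====
-- def solution(n, a, b):
--     # closed form: two bracket positions (0-indexed a-1, b-1) meet at the round
--     # given by the highest differing bit, i.e. the bit length of their XOR
--     return ((a - 1) ^ (b - 1)).bit_length()
-- ===== Notes on version B (the rewrite author's own statement) =====
-- stated objective: simpler
-- what changed: Replaces the ceil-halving while loop with the closed form ((a-1)^(b-1)).bit_length(): the meeting round is the highest bit where the zero-indexed positions differ; Pre_ excludes mixed-sign (a,b) on which A's loop never terminates.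
import Mathlib
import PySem

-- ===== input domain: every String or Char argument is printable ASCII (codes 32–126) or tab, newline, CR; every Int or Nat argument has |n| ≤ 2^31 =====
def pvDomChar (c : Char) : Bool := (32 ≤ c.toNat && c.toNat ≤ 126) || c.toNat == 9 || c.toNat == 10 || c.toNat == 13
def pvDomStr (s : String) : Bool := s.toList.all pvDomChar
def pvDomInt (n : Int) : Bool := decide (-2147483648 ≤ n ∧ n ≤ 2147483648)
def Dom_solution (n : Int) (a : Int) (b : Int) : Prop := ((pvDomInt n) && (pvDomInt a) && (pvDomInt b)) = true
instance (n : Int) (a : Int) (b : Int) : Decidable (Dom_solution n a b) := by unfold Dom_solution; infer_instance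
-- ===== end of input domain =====

-- B replaces A's ceil-halving while loop with the closed form ((a-1)^(b-1)).bit_length() (simpler).

-- ===== PORT A =====
-- A's while loop, fueled (the fuel only makes the recursion total; Pre_ admits exactly
-- the inputs on which Python's loop terminates, and there the fuel is proved sufficient).
def solLoop (fuel : Nat) (a b cnt : Int) : Int :=
  match fuel with
  | 0 => cnt
  | f + 1 =>
    if a = b then cnt
    else solLoop f (PySem.Int.floordiv (a + 1) 2) (PySem.Int.floordiv (b + 1) 2) (cnt + 1)

def solution (n : Int) (a : Int) (b : Int) : Int :=
  solLoop (a.natAbs + b.natAbs + 2) a b 0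

-- ===== PORT B =====
def solution_alt (n : Int) (a : Int) (b : Int) : Int :=
  ((PySem.Int.bitLength (PySem.Int.bxor (a - 1) (b - 1)) : Nat) : Int)

-- ===== PRECONDITION & SPEC =====
-- Pre_ excludes mixed-sign pairs (one of a,b ≥ 1, the other ≤ 0): there Python A's
-- while loop never terminates (the halving map fixes 1 and 0 and never merges the two
-- sides), so A returns no value on them.
def Pre_solution (n : Int) (a : Int) (b : Int) : Prop :=
  (1 ≤ a ∧ 1 ≤ b) ∨ (a ≤ 0 ∧ b ≤ 0)
instance (n : Int) (a : Int) (b : Int) : Decidable (Pre_solution n a b) := by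
  unfold Pre_solution; infer_instance
def pvWitness_solution : Int × Int × Int := (8, 4, 7)

def Spec_solution (n : Int) (a : Int) (b : Int) (out : Int) : Prop := out = solution_alt n a b
instance (n : Int) (a : Int) (b : Int) (out : Int) : Decidable (Spec_solution n a b out) := by
  unfold Spec_solution; infer_instance

-- ===== CLAIM (what is proved, stated in full; the proofs are below) =====
def Claim_equal_solution : Prop :=
  ∀ (n : Int) (a : Int) (b : Int), Dom_solution n a b → Pre_solution n a b →
    Spec_solution n a b (solution n a b)

-- ===== LEMMAS AND PROOFS =====

theorem xor_halve (u v : Nat) : (u ^^^ v) / 2 = (u / 2) ^^^ (v / 2) := by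
  rw [← Nat.shiftRight_one, Nat.shiftRight_xor_distrib, Nat.shiftRight_one, Nat.shiftRight_one]

theorem bl_xor_le (u v : Nat) :
    PySem.Int.bitLength ((u ^^^ v : Nat) : Int) ≤ u + v + 2 := by
  by_cases h : u ^^^ v = 0
  · simp [h]
  · have hpos : 0 < u ^^^ v := Nat.pos_of_ne_zero h
    have huv : u ≠ v := fun he => h (by simp [he])
    have hrec := PySem.Int.bitLength_natCast hpos
    have hdiv := xor_halve u v
    have ih := bl_xor_le (u / 2) (v / 2)
    rw [hrec, hdiv]
    omega
termination_by u + v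
decreasing_by omega

-- positive region: a = u + 1, b = v + 1 with u v : Nat
theorem loop_pos (fuel : Nat) :
    ∀ (u v : Nat) (cnt : Int),
      PySem.Int.bitLength ((u ^^^ v : Nat) : Int) ≤ fuel →
      solLoop fuel ((u : Int) + 1) ((v : Int) + 1) cnt
        = cnt + ((PySem.Int.bitLength ((u ^^^ v : Nat) : Int) : Nat) : Int) := by
  induction fuel with
  | zero =>
    intro u v cnt h
    have hz : u ^^^ v = 0 := by
      by_contra hne
      have := PySem.Int.bitLength_natCast (Nat.pos_of_ne_zero hne)
      omega
    simp [solLoop, hz]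
  | succ f ih =>
    intro u v cnt h
    by_cases huv : u = v
    · subst huv
      simp [solLoop]
    · have hab : ((u : Int) + 1) ≠ ((v : Int) + 1) := by
        intro he; apply huv; exact_mod_cast (by omega : (u : Int) = v)
      have hxne : u ^^^ v ≠ 0 := by simpa [Nat.xor_eq_zero_iff] using huv
      have hrec := PySem.Int.bitLength_natCast (Nat.pos_of_ne_zero hxne)
      have hfd : ∀ w : Nat, PySem.Int.floordiv ((w : Int) + 1 + 1) 2 = ((w / 2 : Nat) : Int) + 1 := by
        intro w
        have h2 : ((w : Int) + 1 + 1) = (((w + 2 : Nat) : Int)) := by push_cast; ring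
        rw [h2, show (2 : Int) = ((2 : Nat) : Int) from rfl, PySem.Int.floordiv_natCast]
        have h3 : (w + 2) / 2 = w / 2 + 1 := by omega
        rw [h3]; push_cast; ring
      have hle : PySem.Int.bitLength (((u / 2) ^^^ (v / 2) : Nat) : Int) ≤ f := by
        rw [← xor_halve]; omega
      simp only [solLoop, if_neg hab, hfd, ih _ _ _ hle]
      rw [← xor_halve, hrec]
      push_cast; ring

-- nonpositive region: a = -u, b = -v with u v : Nat
theorem loop_neg (fuel : Nat) :
    ∀ (u v : Nat) (cnt : Int),
      PySem.Int.bitLength ((u ^^^ v : Nat) : Int) ≤ fuel →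
      solLoop fuel (-(u : Int)) (-(v : Int)) cnt
        = cnt + ((PySem.Int.bitLength ((u ^^^ v : Nat) : Int) : Nat) : Int) := by
  induction fuel with
  | zero =>
    intro u v cnt h
    have hz : u ^^^ v = 0 := by
      by_contra hne
      have := PySem.Int.bitLength_natCast (Nat.pos_of_ne_zero hne)
      omega
    simp [solLoop, hz]
  | succ f ih =>
    intro u v cnt h
    by_cases huv : u = v
    · subst huv
      simp [solLoop]
    · have hab : (-(u : Int)) ≠ (-(v : Int)) := by
        intro he; apply huv; exact_mod_cast (by omega : (u : Int) = v)
      have hxne : u ^^^ v ≠ 0 := by simpa [Nat.xor_eq_zero_iff] using huv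
      have hrec := PySem.Int.bitLength_natCast (Nat.pos_of_ne_zero hxne)
      have hfd : ∀ w : Nat, PySem.Int.floordiv (-(w : Int) + 1) 2 = -((w / 2 : Nat) : Int) := by
        intro w
        rw [PySem.Int.floordiv_eq_iff_of_pos (by omega : (0:Int) < 2)]
        omega
      have hle : PySem.Int.bitLength (((u / 2) ^^^ (v / 2) : Nat) : Int) ≤ f := by
        rw [← xor_halve]; omega
      simp only [solLoop, if_neg hab, hfd, ih _ _ _ hle]
      rw [← xor_halve, hrec]
      push_cast; ring

theorem bxor_neg (u v : Nat) :
    PySem.Int.bxor (-(u : Int) - 1) (-(v : Int) - 1) = ((u ^^^ v : Nat) : Int) := by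
  simp [PySem.Int.bxor]
  omega

-- ===== VERDICT (by name: the statement is the Claim_ definition above) =====
theorem solution_spec : Claim_equal_solution := by
  intro n a b _hdom hpre
  unfold Spec_solution solution solution_alt
  rcases hpre with ⟨ha, hb⟩ | ⟨ha, hb⟩
  · -- positive region
    obtain ⟨u, hu⟩ : ∃ u : Nat, a = (u : Int) + 1 :=
      ⟨(a - 1).toNat, by rw [Int.toNat_of_nonneg (by omega)]; ring⟩
    obtain ⟨v, hv⟩ : ∃ v : Nat, b = (v : Int) + 1 :=
      ⟨(b - 1).toNat, by rw [Int.toNat_of_nonneg (by omega)]; ring⟩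
    subst hu hv
    have hfuel : PySem.Int.bitLength ((u ^^^ v : Nat) : Int)
        ≤ ((u : Int) + 1).natAbs + ((v : Int) + 1).natAbs + 2 := by
      have := bl_xor_le u v
      have h1 : ((u : Int) + 1).natAbs = u + 1 := by omega
      have h2 : ((v : Int) + 1).natAbs = v + 1 := by omega
      omega
    rw [loop_pos _ u v 0 hfuel]
    have hx : PySem.Int.bxor ((u : Int) + 1 - 1) ((v : Int) + 1 - 1) = ((u ^^^ v : Nat) : Int) := by
      simp [show ((u : Int) + 1 - 1) = (u : Int) by ring, show ((v : Int) + 1 - 1) = (v : Int) by ring]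
    rw [hx]; ring
  · -- nonpositive region
    obtain ⟨u, hu⟩ : ∃ u : Nat, a = -(u : Int) :=
      ⟨(-a).toNat, by rw [Int.toNat_of_nonneg (by omega)]; ring⟩
    obtain ⟨v, hv⟩ : ∃ v : Nat, b = -(v : Int) :=
      ⟨(-b).toNat, by rw [Int.toNat_of_nonneg (by omega)]; ring⟩
    subst hu hv
    have hfuel : PySem.Int.bitLength ((u ^^^ v : Nat) : Int)
        ≤ (-(u : Int)).natAbs + (-(v : Int)).natAbs + 2 := by
      have := bl_xor_le u v
      have h1 : (-(u : Int)).natAbs = u := by omega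
      have h2 : (-(v : Int)).natAbs = v := by omega
      omega
    rw [loop_neg _ u v 0 hfuel]
    have hx : PySem.Int.bxor (-(u : Int) - 1) (-(v : Int) - 1) = ((u ^^^ v : Nat) : Int) :=
      bxor_neg u v
    rw [hx]; ring
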